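-- pv_equiv track=rewrite | github.com/chillymosh/everybodycodes | 2024/day 3/python/day3.py | begin_dig
-- ===== SOURCE A (Python) =====
-- def adjacent(coord: tuple[int, int], part_no: int) -> list[tuple[int, int]]:
--     r, c = coord
--     directions = [(r - 1, c), (r, c + 1), (r + 1, c), (r, c - 1)]
--     if part_no == 3:
--         directions.extend(
--             [(r - 1, c + 1), (r + 1, c + 1), (r + 1, c - 1), (r - 1, c - 1)]
--         )
--     return directions
--
-- def dig(queue: list[tuple[int, int]], part_no: int) -> list[tuple[int, int]]:
--     return [
--         coord
--         for coord in queue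
--         if all((r, c) in queue for r, c in adjacent(coord, part_no))
--     ]
--
-- def begin_dig(input_data: str, part_no: int) -> int:
--     queue = [
--         (ix, yx)
--         for ix, row in enumerate(input_data.splitlines())
--         for yx, cell in enumerate(row)
--         if cell != "."
--     ]
--
--     counter = len(queue)
--
--     while queue:
--         queue = dig(queue, part_no)
--         counter += len(queue)
--
--     return counter
-- ===== SOURCE B (Python) =====
-- def begin_dig(input_data: str, part_no: int) -> int:
--     cells = [
--         (r, c)
--         for r, row in enumerate(input_data.splitlines())
--         for c, ch in enumerate(row)
--         if ch != "."
--     ]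
--     depth = {cell: 0 for cell in cells}
--     for _ in range(len(cells)):
--         new = {}
--         for r, c in cells:
--             nbs = [(r - 1, c), (r, c + 1), (r + 1, c), (r, c - 1)]
--             if part_no == 3:
--                 nbs += [(r - 1, c + 1), (r + 1, c + 1), (r + 1, c - 1), (r - 1, c - 1)]
--             new[(r, c)] = 1 + min(depth.get(nb, 0) for nb in nbs)
--         if new == depth:
--             break
--         depth = new
--     return sum(depth.values())
-- ===== Notes on version B (the rewrite author's own statement) =====
-- stated objective: faster
-- what changed: Instead of repeatedly peeling the whole queue (each round re-filtering the list with O(n) list-membership tests per neighbour), B computes each cell's survival depth by fixpoint iteration of depth = 1 + min(neighbour depths) over a dict and returns the sum of depths.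
import Mathlib
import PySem

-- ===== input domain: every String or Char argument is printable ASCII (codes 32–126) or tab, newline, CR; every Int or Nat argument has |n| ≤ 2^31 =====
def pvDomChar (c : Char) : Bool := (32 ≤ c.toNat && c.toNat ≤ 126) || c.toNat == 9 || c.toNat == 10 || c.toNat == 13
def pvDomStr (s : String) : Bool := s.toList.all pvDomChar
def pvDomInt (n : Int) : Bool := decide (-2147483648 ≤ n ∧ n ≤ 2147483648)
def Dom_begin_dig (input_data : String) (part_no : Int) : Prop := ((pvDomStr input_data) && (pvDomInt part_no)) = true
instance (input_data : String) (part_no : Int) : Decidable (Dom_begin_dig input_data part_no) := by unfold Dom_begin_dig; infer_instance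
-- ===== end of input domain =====

-- B replaces A's repeated whole-queue peeling (each round re-filters the list, with list-membership
-- scans per neighbour) by a fixpoint iteration of per-cell depths (depth = 1 + min of neighbour
-- depths) in a dict, returning the sum of depths; measured faster.

-- ===== PORT A =====
def adjacentA (coord : Int × Int) (part_no : Int) : List (Int × Int) :=
  let r := coord.1
  let c := coord.2
  let directions : List (Int × Int) := [(r - 1, c), (r, c + 1), (r + 1, c), (r, c - 1)]
  if part_no == 3 then
    directions ++ [(r - 1, c + 1), (r + 1, c + 1), (r + 1, c - 1), (r - 1, c - 1)]
  else
    directions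

def digA (queue : List (Int × Int)) (part_no : Int) : List (Int × Int) :=
  queue.filter (fun coord => (adjacentA coord part_no).all (fun nb => queue.contains nb))

-- termination fact for the while-loop below (a cell of minimal row is always peeled)
theorem digA_length_lt (queue : List (Int × Int)) (part_no : Int) (h : queue ≠ []) :
    (digA queue part_no).length < queue.length := by
  obtain ⟨m, hm⟩ : ∃ m, PySem.List.min? queue (fun x => x.1) = some m := by
    cases hq : PySem.List.min? queue (fun x => x.1) with
    | none => exact absurd ((PySem.List.min?_eq_none_iff _ _).mp hq) h
    | some m => exact ⟨m, rfl⟩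
  have hmem : m ∈ queue := PySem.List.min?_mem hm
  have hmin : ∀ y ∈ queue, m.1 ≤ y.1 := PySem.List.min?_isMin hm
  apply List.length_filter_lt_length_iff_exists.mpr
  refine ⟨m, hmem, ?_⟩
  have hnb : ((m.1 - 1, m.2) : Int × Int) ∉ queue := by
    intro hin
    have h2 : m.1 ≤ m.1 - 1 := hmin _ hin
    omega
  have hadj : ((m.1 - 1, m.2) : Int × Int) ∈ adjacentA m part_no := by
    unfold adjacentA
    split <;> simp
  simp only [List.all_eq_true, not_forall]
  exact ⟨(m.1 - 1, m.2), hadj, by simpa using hnb⟩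

def digLoopA (part_no : Int) (queue : List (Int × Int)) : Int :=
  if h : queue = [] then 0
  else
    let queue' := digA queue part_no
    (queue'.length : Int) + digLoopA part_no queue'
termination_by queue.length
decreasing_by exact digA_length_lt queue part_no h

def cellsOf (input_data : String) : List (Int × Int) :=
  (PySem.List.enumerate (PySem.Str.splitlines input_data)).flatMap
    (fun p =>
      ((PySem.List.enumerate p.2.toList).filter (fun q => q.2 != '.')).map
        (fun q => (p.1, q.1)))

def begin_dig (input_data : String) (part_no : Int) : Int :=
  let queue := cellsOf input_data
  (queue.length : Int) + digLoopA part_no queue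

-- ===== PORT B =====
def nbsB (r : Int) (c : Int) (part_no : Int) : List (Int × Int) :=
  let nbs : List (Int × Int) := [(r - 1, c), (r, c + 1), (r + 1, c), (r, c - 1)]
  if part_no == 3 then
    nbs ++ [(r - 1, c + 1), (r + 1, c + 1), (r + 1, c - 1), (r - 1, c - 1)]
  else
    nbs

-- min() of a nonempty list (leftmost minimum); [] arm is never reached
def minvB : List Int → Int
  | [] => 0
  | v :: vs => vs.foldl min v

def valB (part_no : Int) (depth : PySem.Dict (Int × Int) Int) (cell : Int × Int) : Int :=
  1 + minvB ((nbsB cell.1 cell.2 part_no).map (fun nb => depth.getD nb 0))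

def stepB (part_no : Int) (cells : List (Int × Int)) (depth : PySem.Dict (Int × Int) Int) :
    PySem.Dict (Int × Int) Int :=
  cells.foldl (fun nw cell => nw.insert cell (valB part_no depth cell)) PySem.Dict.empty

-- the old and the new dict are both keyed by `cells` in the same order, so Python's
-- order-insensitive dict `==` coincides with `=` on PySem.Dict here
def iterB (part_no : Int) (cells : List (Int × Int)) :
    Nat → PySem.Dict (Int × Int) Int → PySem.Dict (Int × Int) Int
  | 0, depth => depth
  | k + 1, depth =>
    let nw := stepB part_no cells depth
    if nw = depth then depth else iterB part_no cells k nw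

def begin_dig_alt (input_data : String) (part_no : Int) : Int :=
  let cells := cellsOf input_data
  let depth0 := cells.foldl (fun d cell => d.insert cell 0) PySem.Dict.empty
  let dfin := iterB part_no cells cells.length depth0
  dfin.values.foldl (· + ·) 0

-- ===== PRECONDITION & SPEC =====
def Spec_begin_dig (input_data : String) (part_no : Int) (out : Int) : Prop := out = begin_dig_alt input_data part_no
instance (input_data : String) (part_no : Int) (out : Int) : Decidable (Spec_begin_dig input_data part_no out) := by unfold Spec_begin_dig; infer_instance

-- ===== CLAIM (what is proved, stated in full; the proofs are below) =====
def Claim_equal_begin_dig : Prop := ∀ (input_data : String) (part_no : Int), Dom_begin_dig input_data part_no → Spec_begin_dig input_data part_no (begin_dig input_data part_no)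

-- ===== LEMMAS AND PROOFS =====

-- the peeling sequence Q_k
def digIter (p : Int) (S : List (Int × Int)) (k : Nat) : List (Int × Int) :=
  (fun q => digA q p)^[k] S

theorem digIter_succ' (p : Int) (S : List (Int × Int)) (k : Nat) :
    digIter p S (k + 1) = digA (digIter p S k) p :=
  Function.iterate_succ_apply' _ _ _

theorem digIter_succ (p : Int) (S : List (Int × Int)) (k : Nat) :
    digIter p S (k + 1) = digIter p (digA S p) k :=
  Function.iterate_succ_apply _ _ _

theorem digA_sublist (q : List (Int × Int)) (p : Int) : (digA q p).Sublist q := by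
  unfold digA; exact List.filter_sublist

theorem digIter_sublist (p : Int) (S : List (Int × Int)) (k : Nat) :
    (digIter p S k).Sublist S := by
  induction k with
  | zero => exact List.Sublist.refl S
  | succ k ih =>
    rw [digIter_succ']
    exact (digA_sublist _ _).trans ih

theorem mem_digIter_succ_iff (p : Int) (S : List (Int × Int)) (k : Nat) (c : Int × Int) :
    c ∈ digIter p S (k + 1) ↔
      c ∈ digIter p S k ∧ ∀ nb ∈ adjacentA c p, nb ∈ digIter p S k := by
  rw [digIter_succ']
  simp [digA, List.mem_filter, List.all_eq_true]

theorem digIter_eq_nil (p : Int) : ∀ (n : Nat) (q : List (Int × Int)), q.length ≤ n →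
    digIter p q n = [] := by
  intro n
  induction n with
  | zero =>
    intro q h
    have : q = [] := List.eq_nil_of_length_eq_zero (Nat.le_zero.mp h)
    simpa [digIter] using this
  | succ n ih =>
    intro q h
    by_cases hq : q = []
    · subst hq
      rw [digIter_succ]
      exact ih _ (by simp [digA])
    · rw [digIter_succ]
      exact ih _ (by have := digA_length_lt q p hq; omega)

theorem exists_out (p : Int) (S : List (Int × Int)) (c : Int × Int) :
    ∃ k, c ∉ digIter p S k :=
  ⟨S.length, by rw [digIter_eq_nil p S.length S le_rfl]; simp⟩

-- survival depth of a cell: first round it is no longer present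
def Dp (p : Int) (S : List (Int × Int)) (c : Int × Int) : Nat :=
  Nat.find (exists_out p S c)

theorem mem_digIter_iff_lt (p : Int) (S : List (Int × Int)) (c : Int × Int) (j : Nat) :
    c ∈ digIter p S j ↔ j < Dp p S c := by
  have out_mono : ∀ k, c ∉ digIter p S k → c ∉ digIter p S (k + 1) := by
    intro k hk hmem
    exact hk ((mem_digIter_succ_iff p S k c).mp hmem).1
  constructor
  · intro hmem
    by_contra hlt
    push_neg at hlt
    have hout : c ∉ digIter p S (Dp p S c) := Nat.find_spec (exists_out p S c)
    have : ∀ j', Dp p S c ≤ j' → c ∉ digIter p S j' := by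
      intro j' hj'
      induction j', hj' using Nat.le_induction with
      | base => exact hout
      | succ n hmn ih => exact out_mono n ih
    exact this j hlt hmem
  · intro hlt
    have := Nat.find_min (exists_out p S c) hlt
    simpa using this

theorem Dp_le_length (p : Int) (S : List (Int × Int)) (c : Int × Int) :
    Dp p S c ≤ S.length := by
  apply Nat.find_le
  rw [digIter_eq_nil p S.length S le_rfl]
  simp

theorem Dp_eq_zero_of_not_mem (p : Int) (S : List (Int × Int)) (c : Int × Int)
    (h : c ∉ S) : Dp p S c = 0 := by
  by_contra h0
  exact h ((mem_digIter_iff_lt p S c 0).mpr (Nat.pos_of_ne_zero h0))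

theorem Dp_le_adj (p : Int) (S : List (Int × Int)) (c nb : Int × Int)
    (hnb : nb ∈ adjacentA c p) : Dp p S c ≤ Dp p S nb + 1 := by
  by_contra hgt
  push_neg at hgt
  have hc : c ∈ digIter p S (Dp p S nb + 1) := (mem_digIter_iff_lt p S c _).mpr hgt
  have := ((mem_digIter_succ_iff p S (Dp p S nb) c).mp hc).2 nb hnb
  have := (mem_digIter_iff_lt p S nb _).mp this
  omega

theorem exists_adj_lt (p : Int) (S : List (Int × Int)) (c : Int × Int) (hc : c ∈ S) :
    ∃ nb ∈ adjacentA c p, Dp p S nb + 1 ≤ Dp p S c := by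
  have h1 : 0 < Dp p S c := (mem_digIter_iff_lt p S c 0).mp (by simpa [digIter] using hc)
  obtain ⟨k, hk⟩ : ∃ k, Dp p S c = k + 1 := ⟨Dp p S c - 1, by omega⟩
  have hout : c ∉ digIter p S (k + 1) := by
    rw [mem_digIter_iff_lt]; omega
  have hin : c ∈ digIter p S k := by
    rw [mem_digIter_iff_lt]; omega
  rw [mem_digIter_succ_iff] at hout
  push_neg at hout
  obtain ⟨nb, hnb, hnbout⟩ := hout hin
  refine ⟨nb, hnb, ?_⟩
  have := (mem_digIter_iff_lt p S nb k).not.mp hnbout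
  omega

-- ---- A-side sum ----
theorem digLoopA_eq (p : Int) (q : List (Int × Int)) :
    digLoopA p q = ∑ k ∈ Finset.range q.length, ((digIter p q (k + 1)).length : Int) := by
  suffices H : ∀ (n : Nat) (q : List (Int × Int)), q.length ≤ n →
      digLoopA p q = ∑ k ∈ Finset.range q.length, ((digIter p q (k + 1)).length : Int) from
    H q.length q le_rfl
  intro n
  induction n with
  | zero =>
    intro q h
    have hq : q = [] := List.eq_nil_of_length_eq_zero (Nat.le_zero.mp h)
    subst hq
    rw [digLoopA]
    simp
  | succ n ih =>
    intro q h
    by_cases hq : q = []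
    · subst hq
      rw [digLoopA]
      simp
    · rw [digLoopA]
      simp only [dif_neg hq]
      have hlt := digA_length_lt q p hq
      rw [ih (digA q p) (by omega)]
      obtain ⟨m, hm⟩ : ∃ m, q.length = m + 1 := by
        cases q with
        | nil => exact absurd rfl hq
        | cons a l => exact ⟨l.length, rfl⟩
      rw [hm, Finset.sum_range_succ']
      have hbody : ∀ k : Nat, digIter p q (k + 1 + 1) = digIter p (digA q p) (k + 1) :=
        fun k => digIter_succ p q (k + 1)
      simp only [hbody]
      have h0 : digIter p q (0 + 1) = digA q p := digIter_succ p q 0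
      rw [h0]
      have htrim : ∑ k ∈ Finset.range (digA q p).length, ((digIter p (digA q p) (k + 1)).length : Int)
          = ∑ k ∈ Finset.range m, ((digIter p (digA q p) (k + 1)).length : Int) := by
        apply Finset.sum_subset
        · intro x hx
          have hb : (digA q p).length ≤ m := by omega
          have hx' := Finset.mem_range.mp hx
          exact Finset.mem_range.mpr (lt_of_lt_of_le hx' hb)
        · intro k _ hnk
          simp only [Finset.mem_range, not_lt] at hnk
          rw [digIter_eq_nil p (k + 1) (digA q p) (by omega)]
          simp
      rw [htrim]
      ring

-- ---- B-side dict lemmas ----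
theorem foldl_insert_items (val : (Int × Int) → Int) :
    ∀ (l : List (Int × Int)) (acc : PySem.Dict (Int × Int) Int), l.Nodup →
      (∀ c ∈ l, acc.contains c = false) →
      (l.foldl (fun d c => d.insert c (val c)) acc).items
        = acc.items ++ l.map (fun c => (c, val c)) := by
  intro l
  induction l with
  | nil => intro acc _ _; simp
  | cons c l ih =>
    intro acc hnd hacc
    simp only [List.foldl_cons, List.map_cons]
    have hc : acc.contains c = false := hacc c (by simp)
    have h1 : (acc.insert c (val c)).items = acc.items ++ [(c, val c)] :=
      PySem.Dict.items_insert_of_not_contains acc (val c) hc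
    have h2 : ∀ c' ∈ l, (acc.insert c (val c)).contains c' = false := by
      intro c' hc'
      rw [PySem.Dict.contains_insert]
      have hne : c' ≠ c := by
        rintro rfl
        exact (List.nodup_cons.mp hnd).1 hc'
      simp [hne, hacc c' (by simp [hc'])]
    rw [ih (acc.insert c (val c)) (List.nodup_cons.mp hnd).2 h2, h1]
    simp

theorem getD_of_items_map (d : PySem.Dict (Int × Int) Int) (S : List (Int × Int))
    (val : (Int × Int) → Int) (h : d.items = S.map (fun c => (c, val c))) (hnd : S.Nodup)
    (c : Int × Int) : d.getD c 0 = if c ∈ S then val c else 0 := by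
  have hkeys : d.keys = S := by
    simp only [PySem.Dict.keys, h, List.map_map]
    exact List.map_id' _
  by_cases hc : c ∈ S
  · have hnd' : d.keys.Nodup := by rw [hkeys]; exact hnd
    have hmem : (c, val c) ∈ d.items := by
      rw [h]
      exact List.mem_map_of_mem hc
    have := PySem.Dict.get?_of_mem_items d hmem hnd'
    simp [PySem.Dict.getD, this, hc]
  · have hcont : d.contains c = false := by
      rw [← Bool.not_eq_true]
      rw [PySem.Dict.contains_iff_mem_keys, hkeys]
      exact hc
    have hnone : d.get? c = none := (PySem.Dict.get?_eq_none_iff_contains d c).mpr hcont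
    simp [PySem.Dict.getD, hnone, hc]

theorem nbsB_eq_adjacentA (c : Int × Int) (p : Int) : nbsB c.1 c.2 p = adjacentA c p := rfl

theorem adjacentA_ne_nil (c : Int × Int) (p : Int) : adjacentA c p ≠ [] := by
  unfold adjacentA
  split <;> simp

theorem minvB_eq (l : List Int) (hl : l ≠ []) (m : Int)
    (hub : ∃ x ∈ l, x ≤ m) (hlb : ∀ x ∈ l, m ≤ x) : minvB l = m := by
  cases l with
  | nil => exact absurd rfl hl
  | cons v vs =>
    simp only [minvB]
    obtain ⟨hle_a, hle_mem⟩ := PySem.List.foldl_min_le vs v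
    apply le_antisymm
    · obtain ⟨x, hx, hxm⟩ := hub
      rcases List.mem_cons.mp hx with rfl | hx'
      · exact le_trans hle_a hxm
      · exact le_trans (hle_mem x hx') hxm
    · rcases PySem.List.foldl_min_mem vs v with heq | hmem
      · rw [heq]; exact hlb v (by simp)
      · exact hlb _ (by simp [hmem])

-- the invariant: after i fixpoint iterations every cell holds min(Dp, i)
theorem items_iter (p : Int) (S : List (Int × Int)) (hnd : S.Nodup) : ∀ i : Nat,
    ((stepB p S)^[i] (S.foldl (fun d cell => d.insert cell 0) PySem.Dict.empty)).items
      = S.map (fun c => (c, min ((Dp p S c : Int)) (i : Int))) := by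
  intro i
  induction i with
  | zero =>
    have h := foldl_insert_items (fun _ => (0 : Int)) S PySem.Dict.empty hnd
      (by intro c _; rfl)
    simp only [Function.iterate_zero, id]
    refine h.trans ?_
    have hemp : (PySem.Dict.empty : PySem.Dict (Int × Int) Int).items = [] := rfl
    rw [hemp]
    simp only [List.nil_append]
    apply List.map_congr_left
    intro c _
    simp
  | succ i ih =>
    rw [Function.iterate_succ_apply']
    set d := (stepB p S)^[i] (S.foldl (fun d cell => d.insert cell 0) PySem.Dict.empty) with hd
    have hgetD : ∀ x, d.getD x 0 = min ((Dp p S x : Int)) (i : Int) := by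
      intro x
      rw [getD_of_items_map d S _ ih hnd x]
      by_cases hx : x ∈ S
      · simp [hx]
      · have h0 : Dp p S x = 0 := Dp_eq_zero_of_not_mem p S x hx
        simp [hx, h0]
    have hstep := foldl_insert_items (valB p d) S PySem.Dict.empty hnd (by intro c _; rfl)
    refine hstep.trans ?_
    have hemp : (PySem.Dict.empty : PySem.Dict (Int × Int) Int).items = [] := rfl
    rw [hemp]
    simp only [List.nil_append]
    apply List.map_congr_left
    intro c hc
    have h1 : 0 < Dp p S c := (mem_digIter_iff_lt p S c 0).mp (by simpa [digIter] using hc)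
    have hva : valB p d c = min ((Dp p S c : Int)) ((i : Int) + 1) := by
      unfold valB
      rw [nbsB_eq_adjacentA]
      have hmapne : (adjacentA c p).map (fun nb => d.getD nb 0) ≠ [] := by
        simp [adjacentA_ne_nil]
      rw [minvB_eq _ hmapne (min ((Dp p S c : Int) - 1) (i : Int)) ?ub ?lb]
      · omega
      case ub =>
        obtain ⟨nb, hnb, hle⟩ := exists_adj_lt p S c hc
        refine ⟨d.getD nb 0, List.mem_map_of_mem hnb, ?_⟩
        rw [hgetD nb]
        omega
      case lb =>
        intro x hx
        obtain ⟨nb, hnb, rfl⟩ := List.mem_map.mp hx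
        rw [hgetD nb]
        have := Dp_le_adj p S c nb hnb
        omega
    rw [hva]
    have : ((i + 1 : Nat) : Int) = (i : Int) + 1 := by push_cast; ring
    rw [this]

theorem iterB_eq_iterate (p : Int) (S : List (Int × Int)) : ∀ (k : Nat) d,
    iterB p S k d = (stepB p S)^[k] d := by
  intro k
  induction k with
  | zero => intro d; rfl
  | succ k ih =>
    intro d
    show (if stepB p S d = d then d else iterB p S k (stepB p S d)) = _
    by_cases h : stepB p S d = d
    · simp [h]
      exact (Function.iterate_fixed h k).symm
    · simp only [if_neg h]
      rw [ih, ← Function.iterate_succ_apply]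

-- ---- the counting identity (double counting survivals) ----
theorem key_count (p : Int) (S : List (Int × Int)) (hnd : S.Nodup) :
    ∑ c ∈ S.toFinset, Dp p S c = ∑ k ∈ Finset.range S.length, (digIter p S k).length := by
  classical
  have hcard : ∀ c ∈ S.toFinset, Dp p S c
      = ((Finset.range S.length).filter (fun k => c ∈ digIter p S k)).card := by
    intro c _
    have hfil : (Finset.range S.length).filter (fun k => c ∈ digIter p S k)
        = Finset.range (Dp p S c) := by
      ext k
      have hle := Dp_le_length p S c
      simp only [Finset.mem_filter, Finset.mem_range, mem_digIter_iff_lt]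
      omega
    rw [hfil, Finset.card_range]
  rw [Finset.sum_congr rfl hcard]
  simp only [Finset.card_filter]
  rw [Finset.sum_comm]
  apply Finset.sum_congr rfl
  intro k _
  rw [← Finset.card_filter]
  have hset : S.toFinset.filter (fun c => c ∈ digIter p S k) = (digIter p S k).toFinset := by
    ext c
    simp only [Finset.mem_filter, List.mem_toFinset]
    exact ⟨fun h => h.2, fun h => ⟨(digIter_sublist p S k).subset h, h⟩⟩
  rw [hset, List.toFinset_card_of_nodup ((digIter_sublist p S k).nodup hnd)]

theorem cells_nodup (s : String) : (cellsOf s).Nodup := by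
  unfold cellsOf
  rw [List.nodup_flatMap]
  constructor
  · intro x _
    have hpw := PySem.List.pairwise_lt_enumerate x.2.toList 0
    have hpwf := hpw.filter (fun q => q.2 != '.')
    have hpwm := hpwf.map (f := fun q => (x.1, q.1))
      (fun a b hab => (by simp; omega : (x.1, a.1) ≠ (x.1, b.1)))
    exact hpwm
  · have hpw := PySem.List.pairwise_lt_enumerate (PySem.Str.splitlines s) 0
    apply hpw.imp
    intro a b hab
    intro x hxa hxb
    simp only [List.mem_map] at hxa hxb
    obtain ⟨qa, _, hqa⟩ := hxa
    obtain ⟨qb, _, hqb⟩ := hxb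
    have : a.1 = b.1 := by
      have h1 : x.1 = a.1 := by rw [← hqa]
      have h2 : x.1 = b.1 := by rw [← hqb]
      omega
    omega

theorem begin_dig_alt_eq (s : String) (p : Int) :
    begin_dig_alt s p = ((cellsOf s).map (fun c => (Dp p (cellsOf s) c : Int))).sum := by
  show (iterB p (cellsOf s) (cellsOf s).length
      ((cellsOf s).foldl (fun d cell => d.insert cell 0) PySem.Dict.empty)).values.foldl (· + ·) 0 = _
  rw [iterB_eq_iterate]
  have hitems := items_iter p (cellsOf s) (cells_nodup s) (cellsOf s).length
  simp only [PySem.Dict.values]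
  rw [hitems, List.map_map]
  rw [← List.sum_eq_foldl]
  apply congrArg List.sum
  apply List.map_congr_left
  intro c hc
  have hle := Dp_le_length p (cellsOf s) c
  simp only [Function.comp]
  omega

theorem begin_dig_eq (s : String) (p : Int) :
    begin_dig s p = ∑ k ∈ Finset.range (cellsOf s).length, ((digIter p (cellsOf s) k).length : Int) := by
  show ((cellsOf s).length : Int) + digLoopA p (cellsOf s) = _
  rw [digLoopA_eq]
  have h1 := Finset.sum_range_succ (fun k => ((digIter p (cellsOf s) k).length : Int)) (cellsOf s).length
  have h2 := Finset.sum_range_succ' (fun k => ((digIter p (cellsOf s) k).length : Int)) (cellsOf s).length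
  have h3 : digIter p (cellsOf s) (cellsOf s).length = [] :=
    digIter_eq_nil p (cellsOf s).length (cellsOf s) le_rfl
  have h4 : digIter p (cellsOf s) 0 = cellsOf s := rfl
  have key := h2.symm.trans h1
  rw [h3, h4] at key
  simp only [List.length_nil, Nat.cast_zero, add_zero] at key
  linarith [key]

-- ===== VERDICT (by name: the statement is the Claim_ definition above) =====
theorem begin_dig_spec : Claim_equal_begin_dig := by
  intro s p _
  unfold Spec_begin_dig
  rw [begin_dig_eq, begin_dig_alt_eq]
  have hnd := cells_nodup s
  have h := key_count p (cellsOf s) hnd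
  have h1 : ((cellsOf s).map (fun c => (Dp p (cellsOf s) c : Int))).sum
      = ((∑ c ∈ (cellsOf s).toFinset, Dp p (cellsOf s) c : Nat) : Int) := by
    rw [← List.sum_toFinset _ hnd]
    push_cast
    rfl
  rw [h1, h]
  push_cast
  rfl
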